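-- pv_equiv track=rewrite | github.com/fschmole/pluscal-explorer | tools/ast_to_puml.py | _reassemble_quotes
-- ===== SOURCE A (Python) =====
-- def _reassemble_quotes(tokens: list[str]) -> list[str]:
--     """Merge standalone quote chars back into quoted strings: \" M \" → \"M\"."""
--     result: list[str] = []
--     i = 0
--     while i < len(tokens):
--         if tokens[i] == '"':
--             # Collect tokens until closing quote
--             j = i + 1
--             parts: list[str] = []
--             while j < len(tokens) and tokens[j] != '"':
--                 parts.append(tokens[j])
--                 j += 1
--             if j < len(tokens):  # found closing quote
--                 result.append('"' + ''.join(parts) + '"')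
--                 i = j + 1
--             else:
--                 result.append(tokens[i])
--                 i += 1
--         else:
--             result.append(tokens[i])
--             i += 1
--     return result
-- ===== SOURCE B (Python) =====
-- def _reassemble_quotes(tokens: list[str]) -> list[str]:
--     """Merge standalone quote chars back into quoted strings: " M " -> "M"."""
--     result: list[str] = []
--     in_quote = False
--     buffer: list[str] = []
--     for tok in tokens:
--         if tok == '"':
--             if in_quote:
--                 result.append('"' + ''.join(buffer) + '"')
--                 in_quote = False
--             else:
--                 in_quote = True
--                 buffer = []
--         elif in_quote:
--             buffer.append(tok)
--         else:
--             result.append(tok)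
--     if in_quote:
--         # unterminated quote: the lone quote and the remaining tokens pass through
--         result.append('"')
--         result.extend(buffer)
--     return result
-- ===== Notes on version B (the rewrite author's own statement) =====
-- stated objective: simpler
-- what changed: Replaced the index-based outer loop with a nested lookahead scan (and re-scan on unterminated quotes) by a single flat pass maintaining an in_quote flag and a buffer, flushed once after the loop.
import Mathlib
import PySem

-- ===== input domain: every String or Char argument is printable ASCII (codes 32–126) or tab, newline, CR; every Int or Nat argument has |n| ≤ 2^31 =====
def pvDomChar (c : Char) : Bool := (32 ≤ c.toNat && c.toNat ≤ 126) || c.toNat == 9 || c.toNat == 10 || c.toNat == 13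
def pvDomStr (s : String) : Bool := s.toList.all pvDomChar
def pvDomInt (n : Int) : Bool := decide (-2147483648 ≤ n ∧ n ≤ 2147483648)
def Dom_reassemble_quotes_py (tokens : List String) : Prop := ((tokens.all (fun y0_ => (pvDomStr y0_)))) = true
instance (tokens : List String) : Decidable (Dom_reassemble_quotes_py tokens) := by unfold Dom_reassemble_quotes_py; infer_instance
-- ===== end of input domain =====

-- B replaces A's nested lookahead scan (with re-scan after an unterminated quote) by a single flat pass
-- maintaining an in_quote flag and a buffer, flushed once after the loop (simpler decomposition).


-- ===== PORT A =====
-- inner while loop of A: collect tokens from index j until a closing quote; returns (parts, final j)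
def pvAInner (tokens : List String) (j : Nat) : List String × Nat :=
  if _h : j < tokens.length then
    if tokens.getD j "" ≠ "\"" then
      let r := pvAInner tokens (j + 1)
      (tokens.getD j "" :: r.1, r.2)
    else ([], j)
  else ([], j)
termination_by tokens.length - j

theorem pvAInner_eq (tokens : List String) (j : Nat) :
    pvAInner tokens j = ((tokens.drop j).takeWhile (· ≠ "\""),
      j + ((tokens.drop j).takeWhile (· ≠ "\"")).length) := by
  unfold pvAInner
  split
  · rename_i h
    have hd : tokens.drop j = tokens[j] :: tokens.drop (j + 1) := by
      simpa using (List.drop_eq_getElem_cons h)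
    have hg : tokens.getD j "" = tokens[j] := by
      simp [List.getD, List.getElem?_eq_getElem h]
    rw [hd, hg]
    split
    · rename_i hne
      have hpa : (fun x => decide (x ≠ ("\"" : String))) tokens[j] = true := by
        simpa using hne
      rw [pvAInner_eq tokens (j + 1)]
      rw [List.takeWhile_cons, if_pos hpa]
      simp
      omega
    · rename_i hne
      have hpa : ¬ ((fun x => decide (x ≠ ("\"" : String))) tokens[j] = true) := by
        simpa using hne
      rw [List.takeWhile_cons, if_neg hpa]
      simp
  · rename_i h
    have : tokens.drop j = [] := List.drop_eq_nil_of_le (by omega)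
    simp [this]
termination_by tokens.length - j

theorem pvAInner_snd_ge (tokens : List String) (j : Nat) : j ≤ (pvAInner tokens j).2 := by
  rw [pvAInner_eq]; omega

-- outer while loop of A (the termination lemma pvAInner_snd_ge above is cited by decreasing_by)
def pvAOuter (tokens : List String) (i : Nat) : List String :=
  if _h : i < tokens.length then
    if tokens.getD i "" = "\"" then
      if _h2 : (pvAInner tokens (i + 1)).2 < tokens.length then
        ("\"" ++ String.join (pvAInner tokens (i + 1)).1 ++ "\"") :: pvAOuter tokens ((pvAInner tokens (i + 1)).2 + 1)
      else
        tokens.getD i "" :: pvAOuter tokens (i + 1)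
    else
      tokens.getD i "" :: pvAOuter tokens (i + 1)
  else []
termination_by tokens.length - i
decreasing_by
  · have := pvAInner_snd_ge tokens (i + 1); omega
  · omega
  · omega

def reassemble_quotes_py (tokens : List String) : List String := pvAOuter tokens 0

-- ===== PORT B =====
-- one step of B's flat pass: state = (result, in_quote, buffer)
def pvBStep (st : List String × Bool × List String) (tok : String) : List String × Bool × List String :=
  if tok = "\"" then
    if st.2.1 then (st.1 ++ ["\"" ++ String.join st.2.2 ++ "\""], false, st.2.2)
    else (st.1, true, [])
  else if st.2.1 then (st.1, true, st.2.2 ++ [tok])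
  else (st.1 ++ [tok], false, st.2.2)

-- B's after-loop flush of an unterminated quote
def pvBFlush (st : List String × Bool × List String) : List String :=
  if st.2.1 then st.1 ++ ["\""] ++ st.2.2 else st.1

def reassemble_quotes_py_alt (tokens : List String) : List String :=
  pvBFlush (tokens.foldl pvBStep ([], false, []))

-- ===== PRECONDITION & SPEC =====
def Spec_reassemble_quotes_py (tokens : List String) (out : List String) : Prop := out = reassemble_quotes_py_alt tokens
instance (tokens : List String) (out : List String) : Decidable (Spec_reassemble_quotes_py tokens out) := by unfold Spec_reassemble_quotes_py; infer_instance

-- ===== CLAIM (what is proved, stated in full; the proofs are below) =====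
def Claim_equal_reassemble_quotes_py : Prop := ∀ (tokens : List String), Dom_reassemble_quotes_py tokens → Spec_reassemble_quotes_py tokens (reassemble_quotes_py tokens)

-- ===== LEMMAS AND PROOFS =====
-- reference function: quote-merging as a structural recursion on the token list
def pvF : List String → List String
  | [] => []
  | t :: rest =>
    if t = "\"" ∧ rest.dropWhile (· ≠ "\"") ≠ [] then
      ("\"" ++ String.join (rest.takeWhile (· ≠ "\"")) ++ "\"") :: pvF ((rest.dropWhile (· ≠ "\"")).tail)
    else t :: pvF rest
termination_by l => l.length
decreasing_by
  · have h1 : (rest.dropWhile (· ≠ "\"")).length ≤ rest.length := List.length_dropWhile_le _ _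
    have h2 : ((rest.dropWhile (· ≠ "\"")).tail).length = (rest.dropWhile (· ≠ "\"")).length - 1 :=
      List.length_tail
    simp only [List.length_cons]
    omega
  · simp

theorem pvF_no_quote (l : List String) (hall : ∀ x ∈ l, x ≠ "\"") : pvF l = l := by
  induction l with
  | nil => rw [pvF]
  | cons a rest ih =>
    rw [pvF]
    have ha : a ≠ "\"" := hall a (by simp)
    rw [if_neg (fun hc => ha hc.1)]
    rw [ih (fun x hx => hall x (by simp [hx]))]

theorem pvAOuter_eq (tokens : List String) (i : Nat) :
    pvAOuter tokens i = pvF (tokens.drop i) := by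
  unfold pvAOuter
  split
  · rename_i h
    have hd : tokens.drop i = tokens[i] :: tokens.drop (i + 1) := by
      simpa using (List.drop_eq_getElem_cons h)
    have hg : tokens.getD i "" = tokens[i] := by
      simp [List.getD, List.getElem?_eq_getElem h]
    have hsplit : (tokens.drop (i + 1)).takeWhile (· ≠ "\"") ++ (tokens.drop (i + 1)).dropWhile (· ≠ "\"")
        = tokens.drop (i + 1) := List.takeWhile_append_dropWhile
    have hlensum : ((tokens.drop (i + 1)).takeWhile (· ≠ "\"")).length
        + ((tokens.drop (i + 1)).dropWhile (· ≠ "\"")).length = tokens.length - (i + 1) := by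
      have h1 := congrArg List.length hsplit
      rw [List.length_append] at h1
      rw [h1, List.length_drop]
    rw [hg]
    split
    · rename_i hq
      rw [pvAInner_eq tokens (i + 1)]
      have hdropj : tokens.drop (i + 1 + ((tokens.drop (i + 1)).takeWhile (· ≠ "\"")).length)
          = (tokens.drop (i + 1)).dropWhile (· ≠ "\"") := by
        have h1 := List.drop_left (l₁ := (tokens.drop (i + 1)).takeWhile (· ≠ "\""))
          (l₂ := (tokens.drop (i + 1)).dropWhile (· ≠ "\""))
        rw [hsplit] at h1
        rw [← h1, List.drop_drop]
      split
      · rename_i h2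
        have h2' : i + 1 + ((tokens.drop (i + 1)).takeWhile (· ≠ "\"")).length < tokens.length := h2
        have hne : (tokens.drop (i + 1)).dropWhile (· ≠ "\"") ≠ [] := by
          intro hnil
          rw [hnil] at hlensum
          simp only [List.length_nil, Nat.add_zero] at hlensum
          omega
        obtain ⟨c, rest', hcr⟩ := List.exists_cons_of_ne_nil hne
        have hdropj1 : tokens.drop (i + 1 + ((tokens.drop (i + 1)).takeWhile (· ≠ "\"")).length + 1) = rest' := by
          rw [← List.drop_drop, hdropj, hcr]
          simp
        rw [pvAOuter_eq tokens (i + 1 + ((tokens.drop (i + 1)).takeWhile (· ≠ "\"")).length + 1), hdropj1]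
        rw [hd, pvF]
        rw [if_pos ⟨hq, hne⟩]
        rw [hcr]
        simp
      · rename_i h2
        have h2' : tokens.length ≤ i + 1 + ((tokens.drop (i + 1)).takeWhile (· ≠ "\"")).length := by
          simpa using h2
        have hnil : (tokens.drop (i + 1)).dropWhile (· ≠ "\"") = [] := by
          cases hdw : (tokens.drop (i + 1)).dropWhile (· ≠ "\"") with
          | nil => rfl
          | cons c0 r0 =>
            rw [hdw] at hlensum
            exfalso
            simp only [List.length_cons] at hlensum
            omega
        rw [pvAOuter_eq tokens (i + 1), hd, pvF]
        rw [if_neg (fun hc => hc.2 hnil)]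
    · rename_i hq
      rw [pvAOuter_eq tokens (i + 1), hd, pvF]
      rw [if_neg (fun hc => hq hc.1)]
  · rename_i h
    have : tokens.drop i = [] := List.drop_eq_nil_of_le (by omega)
    rw [this, pvF]
termination_by tokens.length - i
decreasing_by
  all_goals omega

theorem pvB_go (rest : List String) :
    (∀ r b, pvBFlush (rest.foldl pvBStep (r, false, b)) = r ++ pvF rest) ∧
    (∀ r b, pvBFlush (rest.foldl pvBStep (r, true, b)) =
      if rest.dropWhile (· ≠ "\"") = [] then r ++ "\"" :: (b ++ rest)
      else r ++ ("\"" ++ String.join (b ++ rest.takeWhile (· ≠ "\"")) ++ "\"")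
        :: pvF ((rest.dropWhile (· ≠ "\"")).tail)) := by
  induction rest with
  | nil =>
    constructor
    · intro r b; simp [pvBFlush, pvF]
    · intro r b; simp [pvBFlush]
  | cons t rest ih =>
    obtain ⟨ihF, ihT⟩ := ih
    constructor
    · intro r b
      by_cases ht : t = "\""
      · subst ht
        rw [List.foldl_cons, show pvBStep (r, false, b) "\"" = (r, true, []) from by
          simp [pvBStep]]
        rw [ihT r []]
        rw [pvF]
        by_cases hdw : rest.dropWhile (· ≠ "\"") = []
        · rw [if_pos hdw, if_neg (fun hc => hc.2 hdw)]
          have hall : ∀ x ∈ rest, x ≠ "\"" := by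
            have := List.dropWhile_eq_nil_iff.mp hdw
            intro x hx; simpa using this x hx
          rw [pvF_no_quote _ hall]
          simp
        · rw [if_neg hdw, if_pos ⟨rfl, hdw⟩]
          simp
      · rw [List.foldl_cons, show pvBStep (r, false, b) t = (r ++ [t], false, b) from by
          simp [pvBStep, ht]]
        rw [ihF (r ++ [t]) b]
        rw [pvF]
        rw [if_neg (fun hc => ht hc.1)]
        simp
    · intro r b
      by_cases ht : t = "\""
      · subst ht
        rw [List.foldl_cons, show pvBStep (r, true, b) "\""
            = (r ++ ["\"" ++ String.join b ++ "\""], false, b) from by simp [pvBStep]]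
        rw [ihF _ b]
        rw [show List.dropWhile (· ≠ "\"") ("\"" :: rest) = "\"" :: rest from by
          simp [List.dropWhile_cons]]
        rw [if_neg (by simp)]
        rw [show List.takeWhile (· ≠ "\"") ("\"" :: rest) = [] from by
          simp [List.takeWhile_cons]]
        simp
      · rw [List.foldl_cons, show pvBStep (r, true, b) t = (r, true, b ++ [t]) from by
          simp [pvBStep, ht]]
        rw [ihT r (b ++ [t])]
        rw [show List.dropWhile (· ≠ "\"") (t :: rest) = List.dropWhile (· ≠ "\"") rest from by
          simp [List.dropWhile_cons, ht]]
        rw [show List.takeWhile (· ≠ "\"") (t :: rest) = t :: List.takeWhile (· ≠ "\"") rest from by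
          simp [List.takeWhile_cons, ht]]
        by_cases hdw : rest.dropWhile (· ≠ "\"") = []
        · rw [if_pos hdw, if_pos hdw]
          simp
        · rw [if_neg hdw, if_neg hdw]
          simp

-- ===== VERDICT (by name: the statement is the Claim_ definition above) =====
theorem reassemble_quotes_py_spec : Claim_equal_reassemble_quotes_py := by
  intro tokens _
  unfold Spec_reassemble_quotes_py reassemble_quotes_py reassemble_quotes_py_alt
  rw [pvAOuter_eq tokens 0]
  rw [(pvB_go tokens).1 [] []]
  simp
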